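-- pv_equiv track=rewrite | github.com/Qrtn/neo | scripts/puzzle/generate_lookup.py | list_tuples_to_array
-- ===== SOURCE A (Python) =====
-- def list_tuples_to_array(d):
--     keys = {i[0] for i in d}
--
--     if len(keys) != len(d):
--         raise KeyError("duplicate keys in list of tuples")
--
--     size = max(keys) + 1
--
--     arr = [0] * size
--     for key, val in d:
--         arr[key] = val
--
--     return arr
-- ===== SOURCE B (Python) =====
-- def list_tuples_to_array(d):
--     # Sort the keys once: duplicates become adjacent, the largest key ends up last.
--     keys = sorted(key for key, _ in d)
--     for a, b in zip(keys, keys[1:]):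
--         if a == b:
--             raise KeyError("duplicate keys in list of tuples")
--
--     arr = [0] * (keys[-1] + 1)  # raises on empty input, as A's max(set()) does
--     for key, val in d:
--         arr[key] = val
--     return arr
-- ===== Notes on version B (the rewrite author's own statement) =====
-- stated objective: alternative
-- what changed: A builds a key set, detects duplicates by comparing the set size to len(d) and sizes the array with max(); B sorts the keys once and uses sort-then-scan: duplicates are found by comparing adjacent sorted keys and the array size comes from the last sorted key, with no set and no max().
import Mathlib
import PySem

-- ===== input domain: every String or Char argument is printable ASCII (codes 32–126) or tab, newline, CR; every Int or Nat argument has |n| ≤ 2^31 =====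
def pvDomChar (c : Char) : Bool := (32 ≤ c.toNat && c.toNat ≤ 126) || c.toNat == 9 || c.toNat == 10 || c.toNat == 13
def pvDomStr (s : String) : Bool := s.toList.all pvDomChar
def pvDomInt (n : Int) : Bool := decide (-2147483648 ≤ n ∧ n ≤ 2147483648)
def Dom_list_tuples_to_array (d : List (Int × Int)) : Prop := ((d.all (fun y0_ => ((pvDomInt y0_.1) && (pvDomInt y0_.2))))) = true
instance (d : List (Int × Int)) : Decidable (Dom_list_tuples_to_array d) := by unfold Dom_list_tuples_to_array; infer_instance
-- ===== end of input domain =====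

-- B replaces A's set-build + size-comparison + max() by one sort of the keys followed by an
-- adjacent-duplicate scan, taking the array size from the last sorted key (objective: alternative).

-- ===== PORT A =====
-- keys = {i[0] for i in d}; if len(keys) != len(d): raise; size = max(keys)+1;
-- arr = [0]*size; for key,val in d: arr[key] = val.  Raise paths return [] (excluded by Pre_).
def list_tuples_to_array (d : List (Int × Int)) : List Int :=
  let keys : PySem.Set Int := PySem.Set.ofList (d.map (fun i => i.1))
  if PySem.Set.len keys ≠ (d.length : Int) then []  -- KeyError: outside Pre_
  else
    match PySem.List.max? keys (fun x => x) with
    | none => []  -- ValueError on max of empty set: outside Pre_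
    | some m =>
      let size := m + 1
      d.foldl (fun arr kv => PySem.List.pySetD arr kv.1 kv.2)  -- in range under Pre_
        (List.replicate size.toNat 0)

-- ===== PORT B =====
-- keys = sorted(key for key,_ in d); for a,b in zip(keys, keys[1:]): if a == b: raise;
-- arr = [0]*(keys[-1]+1); for key,val in d: arr[key] = val.  Raise paths return [] (outside Pre_).
def list_tuples_to_array_alt (d : List (Int × Int)) : List Int :=
  let keys := PySem.List.sorted (d.map (fun kv => kv.1)) (fun x => x)
  if (keys.zip (PySem.List.slice keys (some 1) none)).any (fun p => p.1 == p.2) then []  -- KeyError: outside Pre_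
  else
    match PySem.List.pyGet? keys (-1) with
    | none => []  -- IndexError keys[-1] on empty input: outside Pre_
    | some last =>
      d.foldl (fun arr kv => PySem.List.pySetD arr kv.1 kv.2)  -- in range under Pre_
        (List.replicate (last + 1).toNat 0)

-- ===== PRECONDITION & SPEC =====
-- Pre_ excludes exactly the inputs where A raises: duplicate keys (KeyError), the empty
-- list (ValueError from max), and a key below -(max+1) (IndexError in arr[key] = val);
-- the ∃-clause says every key is ≥ -(max+1), phrased without naming the max.
def Pre_list_tuples_to_array (d : List (Int × Int)) : Prop :=
  d ≠ [] ∧ (d.map (fun kv => kv.1)).Nodup ∧ ∀ kv ∈ d, ∃ kv' ∈ d, -(kv'.1 + 1) ≤ kv.1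
instance (d : List (Int × Int)) : Decidable (Pre_list_tuples_to_array d) := by
  unfold Pre_list_tuples_to_array; infer_instance

def pvWitness_list_tuples_to_array : (List (Int × Int)) := [(2, 7), (0, -1), (-1, 5)]

def Spec_list_tuples_to_array (d : List (Int × Int)) (out : List Int) : Prop :=
  out = list_tuples_to_array_alt d
instance (d : List (Int × Int)) (out : List Int) : Decidable (Spec_list_tuples_to_array d out) := by
  unfold Spec_list_tuples_to_array; infer_instance

-- ===== CLAIM (what is proved, stated in full; the proofs are below) =====
def Claim_equal_list_tuples_to_array : Prop := ∀ (d : List (Int × Int)), Dom_list_tuples_to_array d → Pre_list_tuples_to_array d → Spec_list_tuples_to_array d (list_tuples_to_array d)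

-- ===== LEMMAS AND PROOFS =====

-- a strictly increasing list has no equal adjacent pair
theorem pvAdjNe : ∀ (l : List Int), l.Pairwise (· < ·) →
    (l.zip l.tail).any (fun p => p.1 == p.2) = false
  | [], _ => rfl
  | [_], _ => rfl
  | x :: y :: t, h => by
    rw [List.pairwise_cons] at h
    have hxy : x < y := h.1 y List.mem_cons_self
    simp only [List.tail_cons, List.zip_cons_cons, List.any_cons, Bool.or_eq_false_iff]
    exact ⟨by simp [Int.ne_of_lt hxy], pvAdjNe (y :: t) h.2⟩

-- in a ≤-sorted list every element is at most the last one
theorem pvLeGetLast : ∀ (l : List Int) (h : l ≠ []), l.Pairwise (· ≤ ·) →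
    ∀ x ∈ l, x ≤ l.getLast h
  | [], h, _ => absurd rfl h
  | [a], _, _ => by intro x hx; simp at hx; simp [hx]
  | a :: b :: t, _, hpw => by
    rw [List.pairwise_cons] at hpw
    intro x hx
    rw [List.getLast_cons (by simp : b :: t ≠ [])]
    rcases List.mem_cons.mp hx with rfl | hx'
    · exact le_trans (hpw.1 _ (List.getLast_mem _)) (le_refl _)
    · exact pvLeGetLast (b :: t) (by simp) hpw.2 x hx'

-- ===== VERDICT (by name: the statement is the Claim_ definition above) =====
theorem list_tuples_to_array_spec : Claim_equal_list_tuples_to_array := by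
  unfold Claim_equal_list_tuples_to_array
  intro d _ hpre
  obtain ⟨hne, hnd, _⟩ := hpre
  unfold Spec_list_tuples_to_array list_tuples_to_array list_tuples_to_array_alt
  set ks : List Int := d.map (fun kv => kv.1) with hks
  have hksne : ks ≠ [] := by
    simpa [hks, List.map_eq_nil_iff] using hne
  -- A side: the set is the key list itself, the length test passes, max exists
  have hset : PySem.Set.ofList ks = ks := PySem.Set.ofList_eq_self_of_nodup ks hnd
  have hmax : ∃ m, PySem.List.max? ks (fun x => x) = some m := by
    cases hk : ks with
    | nil => exact absurd hk hksne
    | cons a t => exact ⟨t.foldl max a, by rw [PySem.List.max?_id_cons]⟩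
  obtain ⟨m, hm⟩ := hmax
  -- B side: the sorted keys are strictly increasing, nonempty, and end in the max
  set sk : List Int := PySem.List.sorted ks (fun x => x) with hsk
  have hperm : sk.Perm ks := PySem.List.sorted_perm ks (fun x => x) false
  have hsknd : sk.Nodup := hperm.symm.nodup hnd
  have hsklt : sk.Pairwise (· < ·) :=
    ((PySem.List.sorted_pairwise ks (fun x => x)).and hsknd).imp
      (fun h => lt_of_le_of_ne h.1 h.2)
  have hskne : sk ≠ [] := by
    intro h
    have hl : ks.length = 0 := by rw [← hperm.length_eq, h]; rfl
    exact hksne (List.length_eq_zero_iff.mp hl)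
  have hlast : PySem.List.pyGet? sk (-1) = some (sk.getLast hskne) := by
    rw [PySem.List.pyGet?_neg_one, List.getLast?_eq_getLast_of_ne_nil hskne]
  -- the last sorted key equals A's maximum
  have hmeq : m = sk.getLast hskne := by
    apply le_antisymm
    · exact pvLeGetLast sk hskne (PySem.List.sorted_pairwise ks (fun x => x)) m
        (hperm.mem_iff.mpr (PySem.List.max?_mem hm))
    · exact PySem.List.max?_isMax hm _ (hperm.subset (List.getLast_mem hskne))
  simp only [PySem.Set.len, hset, hm, PySem.List.slice_from_one,
    pvAdjNe sk hsklt, hlast, ← hmeq, Bool.false_eq_true, if_false]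
  simp [hks]
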